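-- pv_equiv track=rewrite | github.com/uzaira0/sleep-scoring-demo | sleep_scoring_app/core/algorithms/sleep_period/metrics.py | _count_awakenings
-- ===== SOURCE A (Python) =====
-- def _count_awakenings(sleep_scores: list[int]) -> int:
--     """
--     Count number of awakening episodes.
--
--     An awakening is a contiguous block of wake (0) epochs within the sleep period.
--
--     Args:
--         sleep_scores: List of sleep/wake classifications within period
--
--     Returns:
--         Number of distinct awakening episodes
--
--     """
--     awakenings = 0
--     in_wake_bout = False
--
--     for score in sleep_scores:
--         if score == 0 and not in_wake_bout:  # Wake epoch, start of bout
--             awakenings += 1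
--             in_wake_bout = True
--         elif score == 1:  # Sleep epoch
--             in_wake_bout = False
--
--     return awakenings
-- ===== SOURCE B (Python) =====
-- from itertools import groupby
--
--
-- def _count_awakenings(sleep_scores: list[int]) -> int:
--     """Split scores into maximal runs keyed by `s == 1`; an awakening is a
--     non-sleep run containing at least one wake (0) epoch."""
--     return sum(
--         1
--         for is_sleep, grp in groupby(sleep_scores, key=lambda s: s == 1)
--         if not is_sleep and 0 in grp
--     )
-- ===== Notes on version B (the rewrite author's own statement) =====
-- stated objective: alternative
-- what changed: B replaces A's single pass with a running in_wake_bout flag by an itertools.groupby decomposition: split the scores into maximal runs keyed on s == 1 and count the non-sleep runs that contain a 0.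
import Mathlib
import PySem

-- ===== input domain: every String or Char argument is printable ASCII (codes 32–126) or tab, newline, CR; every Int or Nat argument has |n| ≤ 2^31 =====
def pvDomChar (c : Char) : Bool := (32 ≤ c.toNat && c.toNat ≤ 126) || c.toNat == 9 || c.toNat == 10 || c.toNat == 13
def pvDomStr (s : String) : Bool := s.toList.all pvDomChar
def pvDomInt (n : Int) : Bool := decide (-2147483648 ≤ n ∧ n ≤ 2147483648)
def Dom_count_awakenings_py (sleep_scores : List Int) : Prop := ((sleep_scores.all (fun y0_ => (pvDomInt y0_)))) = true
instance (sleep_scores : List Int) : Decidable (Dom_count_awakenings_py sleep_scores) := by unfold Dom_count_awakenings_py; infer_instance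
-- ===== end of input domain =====

-- B replaces A's running-flag pass by a groupby decomposition (split into maximal
-- runs keyed on s == 1, count non-sleep runs containing a 0); alternative, same cost.


-- ===== PORT A =====
-- literal port of A's loop: foldl over state (awakenings, in_wake_bout)
def count_awakenings_py (sleep_scores : List Int) : Int :=
  (sleep_scores.foldl
    (fun (st : Int × Bool) score =>
      if score == 0 && !st.2 then (st.1 + 1, true)
      else if score == 1 then (st.1, false)
      else st)
    (0, false)).1

-- ===== PORT B =====
-- groupby(key = s == 1): peel one maximal run at a time (takeWhile/dropWhile with
-- the same key as the head), add 1 for a non-sleep run containing a 0.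
def pvSameKey (x s : Int) : Bool := (s == 1) == (x == 1)

def pvGroupCount : List Int → Int
  | [] => 0
  | x :: xs =>
    (if x ≠ 1 ∧ 0 ∈ x :: xs.takeWhile (pvSameKey x) then 1 else 0)
      + pvGroupCount (xs.dropWhile (pvSameKey x))
termination_by xs => xs.length
decreasing_by
  simpa using Nat.lt_succ_of_le (List.length_dropWhile_le (pvSameKey x) xs)

def count_awakenings_py_alt (sleep_scores : List Int) : Int :=
  pvGroupCount sleep_scores

-- ===== PRECONDITION & SPEC =====
def Spec_count_awakenings_py (sleep_scores : List Int) (out : Int) : Prop := out = count_awakenings_py_alt sleep_scores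
instance (sleep_scores : List Int) (out : Int) : Decidable (Spec_count_awakenings_py sleep_scores out) := by unfold Spec_count_awakenings_py; infer_instance

-- ===== CLAIM (what is proved, stated in full; the proofs are below) =====
def Claim_equal_count_awakenings_py : Prop := ∀ (sleep_scores : List Int), Dom_count_awakenings_py sleep_scores → Spec_count_awakenings_py sleep_scores (count_awakenings_py sleep_scores)

-- ===== LEMMAS AND PROOFS =====

-- A's loop body, named (definitionally equal to the lambda in the port)
def pvStep (st : Int × Bool) (score : Int) : Int × Bool :=
  if score == 0 && !st.2 then (st.1 + 1, true)
  else if score == 1 then (st.1, false)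
  else st

-- A's loop, restated as a recursion on the list with the flag as a parameter
def pvAGo (flag : Bool) : List Int → Int
  | [] => 0
  | s :: xs =>
    if s = 0 ∧ flag = false then 1 + pvAGo true xs
    else if s = 1 then pvAGo false xs
    else pvAGo flag xs

theorem pvFoldl_eq (xs : List Int) : ∀ (c : Int) (flag : Bool),
    (xs.foldl pvStep (c, flag)).1 = c + pvAGo flag xs := by
  induction xs with
  | nil => intro c flag; simp [pvAGo]
  | cons s xs ih =>
    intro c flag
    by_cases h0 : s = 0 ∧ flag = false
    · obtain ⟨rfl, rfl⟩ := h0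
      have hstep : pvStep (c, false) 0 = (c + 1, true) := by simp [pvStep]
      rw [List.foldl_cons, hstep, ih]
      simp [pvAGo]; ring
    · by_cases h1 : s = 1
      · obtain rfl := h1
        have hstep : pvStep (c, flag) 1 = (c, false) := by
          cases flag <;> simp [pvStep]
        rw [List.foldl_cons, hstep, ih]
        cases flag <;> simp [pvAGo]
      · have hstep : pvStep (c, flag) s = (c, flag) := by
          cases flag with
          | false =>
            have hs0 : s ≠ 0 := fun h => h0 ⟨h, rfl⟩
            simp [pvStep, hs0, h1]
          | true => simp [pvStep, h1]
        rw [List.foldl_cons, hstep, ih]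
        cases flag with
        | false =>
          have hs0 : s ≠ 0 := fun h => h0 ⟨h, rfl⟩
          simp [pvAGo, hs0, h1]
        | true => simp [pvAGo, h1]

-- flag is irrelevant when the list is empty or starts with a sleep epoch (1)
theorem pvAGo_flag_irrel (xs : List Int)
    (h : xs = [] ∨ ∃ t, xs = 1 :: t) : pvAGo true xs = pvAGo false xs := by
  rcases h with h | ⟨t, h⟩ <;> subst h <;> simp [pvAGo]

-- one sleep epoch resets the flag
theorem pvAGo_one (flag : Bool) (l : List Int) : pvAGo flag (1 :: l) = pvAGo false l := by
  cases flag <;> simp [pvAGo]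

-- a nonempty run of 1s just resets the flag
theorem pvAGo_ones (run : List Int) (h1 : ∀ s ∈ run, s = 1) :
    ∀ (rest : List Int) (flag : Bool), run ≠ [] →
      pvAGo flag (run ++ rest) = pvAGo false rest := by
  induction run with
  | nil => intro _ _ h; exact absurd rfl h
  | cons s t ih =>
    intro rest flag _
    have hs : s = 1 := h1 s (by simp)
    subst hs
    have ht : ∀ s ∈ t, s = 1 := fun s hs => h1 s (by simp [hs])
    rw [List.cons_append, pvAGo_one]
    rcases t with _ | ⟨a, t'⟩
    · simp
    · exact ih ht rest false (by simp)

-- the flag stays true through a run with no 1s, producing no increments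
theorem pvAGo_true_non1 (run : List Int) (h1 : ∀ s ∈ run, s ≠ 1) :
    ∀ (rest : List Int), pvAGo true (run ++ rest) = pvAGo true rest := by
  induction run with
  | nil => intro rest; simp
  | cons s t ih =>
    intro rest
    have hs : s ≠ 1 := h1 s (by simp)
    have ht : ∀ s ∈ t, s ≠ 1 := fun s hs' => h1 s (by simp [hs'])
    simp [pvAGo, hs, ih ht]

-- effect of a run with no 1s, starting with the flag down
theorem pvAGo_non1 (run : List Int) (h1 : ∀ s ∈ run, s ≠ 1) :
    ∀ (rest : List Int),
      pvAGo false (run ++ rest)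
        = (if 0 ∈ run then 1 else 0) + pvAGo (decide (0 ∈ run)) rest := by
  induction run with
  | nil => intro rest; simp
  | cons s t ih =>
    intro rest
    have hs : s ≠ 1 := h1 s (by simp)
    have ht : ∀ x ∈ t, x ≠ 1 := fun x hx => h1 x (by simp [hx])
    by_cases hs0 : s = 0
    · subst hs0
      simp [pvAGo, pvAGo_true_non1 t ht]
    · have h0s : ¬ (0 : Int) = s := fun h => hs0 h.symm
      simp [pvAGo, hs0, hs, ih ht, h0s]

theorem pvDropWhile_head (p : Int → Bool) :
    ∀ (l : List Int) (h : Int) (t : List Int), l.dropWhile p = h :: t → p h = false := by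
  intro l
  induction l with
  | nil => intro h t hl; simp [List.dropWhile] at hl
  | cons a l ih =>
    intro h t hl
    rw [List.dropWhile_cons] at hl
    by_cases hpa : p a
    · simp [hpa] at hl; exact ih h t hl
    · simp [hpa] at hl
      rw [← hl.1]; simpa using hpa

theorem pvMain (n : ℕ) : ∀ (xs : List Int), xs.length ≤ n →
    pvAGo false xs = pvGroupCount xs := by
  induction n with
  | zero =>
    intro xs h
    rcases xs with _ | ⟨x, xs⟩
    · simp [pvAGo, pvGroupCount]
    · simp at h
  | succ n ih =>
    intro xs hlen
    rcases xs with _ | ⟨x, xs⟩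
    · simp [pvAGo, pvGroupCount]
    · have hsplit : x :: (xs.takeWhile (pvSameKey x) ++ xs.dropWhile (pvSameKey x))
          = x :: xs := by
        simp [List.takeWhile_append_dropWhile]
      have hlen' : (xs.dropWhile (pvSameKey x)).length ≤ n := by
        have := List.length_dropWhile_le (pvSameKey x) xs
        simp at hlen; omega
      have ihrest := ih _ hlen'
      have hrest : xs.dropWhile (pvSameKey x) = []
          ∨ ∃ t, xs.dropWhile (pvSameKey x) = 1 :: t ∨ x = 1 := by
        rcases hd : xs.dropWhile (pvSameKey x) with _ | ⟨h', t'⟩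
        · exact Or.inl rfl
        · right
          refine ⟨t', ?_⟩
          by_cases hx1 : x = 1
          · exact Or.inr hx1
          · left
            have hk := pvDropWhile_head (pvSameKey x) xs h' t' hd
            have h'1 : h' = 1 := by
              by_contra hne
              simp [pvSameKey, hx1, hne] at hk
            rw [h'1]
      by_cases hx1 : x = 1
      · subst hx1
        have hrun1 : ∀ s ∈ (1 : Int) :: xs.takeWhile (pvSameKey 1), s = 1 := by
          intro s hs
          rcases List.mem_cons.mp hs with h | h
          · exact h
          · have := List.mem_takeWhile_imp h
            simpa [pvSameKey] using this
        have hones := pvAGo_ones _ hrun1 (xs.dropWhile (pvSameKey 1)) false (by simp)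
        rw [pvGroupCount]
        conv_lhs => rw [← hsplit]
        rw [show ((1 : Int) :: (xs.takeWhile (pvSameKey 1) ++ xs.dropWhile (pvSameKey 1)))
              = ((1 : Int) :: xs.takeWhile (pvSameKey 1)) ++ xs.dropWhile (pvSameKey 1) from rfl]
        rw [hones, ihrest]
        simp
      · have hrun1 : ∀ s ∈ x :: xs.takeWhile (pvSameKey x), s ≠ 1 := by
          intro s hs
          rcases List.mem_cons.mp hs with h | h
          · subst h; exact hx1
          · have := List.mem_takeWhile_imp h
            simp [pvSameKey, hx1] at this
            simpa using this
        have heff := pvAGo_non1 _ hrun1 (xs.dropWhile (pvSameKey x))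
        rw [pvGroupCount]
        conv_lhs => rw [← hsplit]
        rw [show (x :: (xs.takeWhile (pvSameKey x) ++ xs.dropWhile (pvSameKey x)))
              = (x :: xs.takeWhile (pvSameKey x)) ++ xs.dropWhile (pvSameKey x) from rfl]
        rw [heff]
        by_cases h0 : (0 : Int) ∈ x :: xs.takeWhile (pvSameKey x)
        · have hfl : pvAGo true (xs.dropWhile (pvSameKey x))
              = pvAGo false (xs.dropWhile (pvSameKey x)) := by
            apply pvAGo_flag_irrel
            rcases hrest with h | ⟨t, h | h⟩
            · exact Or.inl h
            · exact Or.inr ⟨t, h⟩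
            · exact absurd h hx1
          simp [h0, hfl, ihrest, hx1]
        · simp [h0, ihrest, hx1]

-- ===== VERDICT (by name: the statement is the Claim_ definition above) =====
theorem count_awakenings_py_spec : Claim_equal_count_awakenings_py := by
  intro xs _
  show count_awakenings_py xs = count_awakenings_py_alt xs
  have hA : count_awakenings_py xs = (xs.foldl pvStep (0, false)).1 := rfl
  rw [hA, pvFoldl_eq, pvMain xs.length xs le_rfl]
  simp [count_awakenings_py_alt]
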